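-- pv_equiv track=rewrite | github.com/rohithreddybc/research-command-center | scripts/05_score_topics.py | gap_phrase_hits
-- ===== SOURCE A (Python) =====
-- from typing import Any
--
-- GAP_PHRASES = [
--     "future work", "limitation", "limited to",
--     "do not generalize", "not robust", "remains an open",
--     "remains unclear", "open question", "no benchmark exists",
--     "no standard", "no consensus", "lack of", "insufficient",
--     "we leave", "out of scope", "as future",
-- ]
--
-- def gap_phrase_hits(papers: list[dict[str, Any]]) -> int:
--     hits = 0
--     for p in papers:
--         ab = (p.get("abstract") or "").lower()
--         for ph in GAP_PHRASES:
--             if ph in ab: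
--                 hits += 1
--                 break
--     return hits
-- ===== SOURCE B (Python) =====
-- GAP_PHRASES = [
--     "future work", "limitation", "limited to",
--     "do not generalize", "not robust", "remains an open",
--     "remains unclear", "open question", "no benchmark exists",
--     "no standard", "no consensus", "lack of", "insufficient",
--     "we leave", "out of scope", "as future",
-- ]
--
-- def _scan(ab):
--     # naive multi-pattern matcher: one left-to-right pass over the abstract,
--     # testing every phrase as a prefix at each position
--     for i in range(len(ab)):
--         for ph in GAP_PHRASES:
--             if ab.startswith(ph, i):
--                 return True
--     return False
--
-- def gap_phrase_hits(papers):
--     # staged: normalize every abstract first, then count the matching ones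
--     abstracts = [(p.get("abstract") or "").lower() for p in papers]
--     return len([ab for ab in abstracts if _scan(ab)])
-- ===== Notes on version B (the rewrite author's own statement) =====
-- stated objective: alternative
-- what changed: Replaces A's single accumulator loop with a per-phrase 'in' search and early break by a staged pipeline: first normalize all abstracts, then count via filter-length, with the per-abstract test done as one left-to-right position scan checking every phrase as a prefix at each position (naive multi-pattern matcher).
import Mathlib
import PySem

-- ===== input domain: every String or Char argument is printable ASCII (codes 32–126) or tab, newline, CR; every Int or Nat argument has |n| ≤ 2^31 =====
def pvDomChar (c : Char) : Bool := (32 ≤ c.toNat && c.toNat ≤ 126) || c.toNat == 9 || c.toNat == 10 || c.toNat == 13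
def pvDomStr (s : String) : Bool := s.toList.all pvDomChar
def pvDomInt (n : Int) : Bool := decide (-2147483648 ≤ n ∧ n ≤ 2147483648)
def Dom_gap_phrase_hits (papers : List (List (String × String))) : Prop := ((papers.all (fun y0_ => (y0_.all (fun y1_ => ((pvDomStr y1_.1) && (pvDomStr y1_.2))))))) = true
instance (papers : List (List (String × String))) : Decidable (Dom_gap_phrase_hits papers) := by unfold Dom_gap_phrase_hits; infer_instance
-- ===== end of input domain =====

-- B restructures A as a staged pipeline (normalize all abstracts, then count by filter-length)
-- whose per-abstract test is a single position scan checking every phrase as a prefix (alternative).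

def GAP_PHRASES : List String := [
    "future work", "limitation", "limited to",
    "do not generalize", "not robust", "remains an open",
    "remains unclear", "open question", "no benchmark exists",
    "no standard", "no consensus", "lack of", "insufficient",
    "we leave", "out of scope", "as future"]

-- ===== PORT A =====
-- inner loop: 'for ph in GAP_PHRASES: if ph in ab: hits += 1; break'
def gapLoopA (ab : String) : List String → Bool
  | [] => false
  | ph :: rest => if PySem.Str.isIn ph ab then true else gapLoopA ab rest

def gap_phrase_hits (papers : List (List (String × String))) : Int :=
  papers.foldl (fun hits p =>
    -- (p.get("abstract") or "").lower(); 'x or ""' yields "" exactly when get is None or "",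
    -- which coincides with getD ""
    let ab := PySem.Str.lower (((PySem.Dict.mk p).get? "abstract").getD "")
    if gapLoopA ab GAP_PHRASES then hits + 1 else hits) 0

-- ===== PORT B =====
-- _scan: for i in range(len(ab)): for ph: if ab.startswith(ph, i): return True
-- recursion over the suffix ab[i:]; ab.startswith(ph, i) = Chars.startswith (toList of ab[i:]) ph
def scanB : List Char → Bool
  | [] => false
  | c :: rest =>
    if GAP_PHRASES.any (fun ph => PySem.Chars.startswith (c :: rest) ph.toList) then true
    else scanB rest

-- abstracts = [(p.get("abstract") or "").lower() for p in papers]; len([ab for ab in abstracts if _scan(ab)])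
def gap_phrase_hits_alt (papers : List (List (String × String))) : Int :=
  let abstracts := papers.map (fun p => PySem.Str.lower (((PySem.Dict.mk p).get? "abstract").getD ""))
  (abstracts.filter (fun ab => scanB ab.toList)).length

-- ===== PRECONDITION & SPEC =====
def Spec_gap_phrase_hits (papers : List (List (String × String))) (out : Int) : Prop := out = gap_phrase_hits_alt papers
instance (papers : List (List (String × String))) (out : Int) : Decidable (Spec_gap_phrase_hits papers out) := by unfold Spec_gap_phrase_hits; infer_instance

-- ===== CLAIM (what is proved, stated in full; the proofs are below) =====
def Claim_equal_gap_phrase_hits : Prop := ∀ (papers : List (List (String × String))), Dom_gap_phrase_hits papers → Spec_gap_phrase_hits papers (gap_phrase_hits papers)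

-- ===== LEMMAS AND PROOFS =====

-- A's break-loop is an 'any' over the phrases
theorem gapLoopA_eq_any (ab : String) (l : List String) :
    gapLoopA ab l = l.any (fun ph => PySem.Str.isIn ph ab) := by
  induction l with
  | nil => rfl
  | cons ph rest ih =>
    rw [gapLoopA]; split_ifs with h
    · rw [PySem.Str.isIn_eq] at h
      simp [List.any_cons, h]
    · rw [PySem.Str.isIn_eq] at h
      simp [List.any_cons, h, ih]

-- one unfolding step of B's scan
theorem scanB_cons (c : Char) (rest : List Char) : scanB (c :: rest) =
    ((GAP_PHRASES.any fun ph => PySem.Chars.startswith (c :: rest) ph.toList) || scanB rest) := by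
  rw [scanB]; split_ifs with h <;> simp [h]

-- B's position scan finds a phrase iff some phrase is an infix
theorem scanB_eq_any (s : List Char) :
    scanB s = GAP_PHRASES.any (fun ph => PySem.Chars.isIn ph.toList s) := by
  induction s with
  | nil => decide
  | cons c rest ih =>
    rw [scanB_cons, ih]
    rcases Bool.eq_false_or_eq_true (GAP_PHRASES.any (fun ph => PySem.Chars.isIn ph.toList (c :: rest))) with hR | hR <;> rw [hR]
    · simp only [List.any_eq_true] at hR
      obtain ⟨ph, hm, hin⟩ := hR
      rw [PySem.Chars.isIn_iff_infix, List.infix_cons_iff] at hin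
      rcases hin with hp | hi
      · have hs : PySem.Chars.startswith (c :: rest) ph.toList = true :=
          (PySem.Chars.startswith_iff _ _).mpr hp
        simp only [Bool.or_eq_true, List.any_eq_true]
        exact Or.inl ⟨ph, hm, hs⟩
      · have hs : PySem.Chars.isIn ph.toList rest = true :=
          (PySem.Chars.isIn_iff_infix _ _).mpr hi
        simp only [Bool.or_eq_true, List.any_eq_true]
        exact Or.inr ⟨ph, hm, hs⟩
    · simp only [Bool.or_eq_false_iff, List.any_eq_false] at hR ⊢
      refine ⟨fun ph hm => ?_, fun ph hm => ?_⟩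
      · have h2 := hR ph hm
        intro hs
        rw [PySem.Chars.startswith_iff] at hs
        rw [Bool.not_eq_true, PySem.Chars.isIn_eq_false_iff] at h2
        exact h2 hs.isInfix
      · have h2 := hR ph hm
        rw [Bool.not_eq_true, PySem.Chars.isIn_eq_false_iff] at h2
        rw [Bool.not_eq_true, PySem.Chars.isIn_eq_false_iff]
        intro hs
        exact h2 (hs.trans (List.suffix_cons c rest).isInfix)

-- the two per-paper tests agree
theorem inner_eq (ab : String) :
    gapLoopA ab GAP_PHRASES = scanB ab.toList := by
  rw [gapLoopA_eq_any, scanB_eq_any]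
  simp [PySem.Str.isIn]

-- counting fold equals filter-length, shifted by the accumulator
theorem foldl_count_eq (papers : List (List (String × String))) (acc : Int) :
    papers.foldl (fun hits p =>
      let ab := PySem.Str.lower (((PySem.Dict.mk p).get? "abstract").getD "")
      if gapLoopA ab GAP_PHRASES then hits + 1 else hits) acc
    = acc + ((papers.map (fun p => PySem.Str.lower (((PySem.Dict.mk p).get? "abstract").getD ""))).filter
        (fun ab => scanB ab.toList)).length := by
  induction papers generalizing acc with
  | nil => simp
  | cons p rest ih =>
    rw [List.foldl_cons, ih]
    simp only [List.map_cons, List.filter_cons, inner_eq]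
    split_ifs with h <;> first | (simp; omega) | simp

-- ===== VERDICT (by name: the statement is the Claim_ definition above) =====
theorem gap_phrase_hits_spec : Claim_equal_gap_phrase_hits := by
  intro papers _
  unfold Spec_gap_phrase_hits gap_phrase_hits gap_phrase_hits_alt
  rw [foldl_count_eq]
  simp
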